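-- pv_equiv track=rewrite | github.com/todayis-sunny/Algorithm | 프로그래머스/3/77886. 110 옮기기/110 옮기기.py | find110s
-- ===== SOURCE A (Python) =====
-- def find110s(s):
--     stack = ""
--     cnt = 0
--
--     for ch in s:
--         stack += ch
--         while len(stack) > 2 and stack[-3:] == "110":
--             stack = stack[:-3]
--             cnt += 1
--
--     return stack, cnt
-- ===== SOURCE B (Python) =====
-- def find110s(s):
--     # Repeated first-occurrence deletion: the rule "110" -> "" has no
--     # self-overlap, so deletion is confluent and any removal order yields
--     # the same normal form and removal count as the stack scan.
--     cnt = 0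
--     i = s.find("110")
--     while i != -1:
--         s = s[:i] + s[i + 3:]
--         cnt += 1
--         i = s.find("110")
--     return s, cnt
-- ===== Notes on version B (the rewrite author's own statement) =====
-- stated objective: alternative
-- what changed: Replaces A's character-by-character stack scan (push each char, pop three on a trailing match) with repeated whole-string first-occurrence deletion via str.find and slice splicing; correct because the deletion rule has no self-overlap, hence is confluent, so any removal order yields the same normal form and removal count.
import Mathlib
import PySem

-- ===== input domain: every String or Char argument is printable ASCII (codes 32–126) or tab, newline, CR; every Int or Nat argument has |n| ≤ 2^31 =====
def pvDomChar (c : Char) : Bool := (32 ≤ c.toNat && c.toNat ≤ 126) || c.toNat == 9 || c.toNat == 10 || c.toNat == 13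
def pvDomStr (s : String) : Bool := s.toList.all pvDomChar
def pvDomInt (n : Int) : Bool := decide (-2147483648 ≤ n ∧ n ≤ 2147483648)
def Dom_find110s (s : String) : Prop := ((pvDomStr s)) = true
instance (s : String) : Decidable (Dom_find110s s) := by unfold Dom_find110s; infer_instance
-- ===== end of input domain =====

-- B replaces A's incremental character-stack scan with repeated whole-string
-- first-occurrence deletion (str.find + splice); return value only, no side effects.

-- ===== PORT A =====
-- the inner `while` of A: repeatedly strip a trailing "110" from the string stack
def pvWhileA (st : List Char) (cnt : Int) : List Char × Int :=
  if h : 2 < st.length ∧ PySem.List.slice st (some (-3)) none = ['1', '1', '0'] then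
    pvWhileA (PySem.List.slice st none (some (-3))) (cnt + 1)
  else
    (st, cnt)
termination_by st.length
decreasing_by
  rw [PySem.List.slice_to_neg_ofNat st 3 (by omega)]
  simp only [List.length_take]
  omega

def find110s (s : String) : String × Int :=
  let r := s.toList.foldl (fun acc ch => pvWhileA (acc.1 ++ [ch]) acc.2) (([] : List Char), (0 : Int))
  (String.ofList r.1, r.2)

-- ===== PORT B =====
-- decomposition of the string at the first occurrence of "110" (also needed
-- by the port's termination argument, cited in decreasing_by)
theorem pvCut (cs : List Char) (h : ¬ PySem.Chars.find cs ['1', '1', '0'] = -1) :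
    0 ≤ PySem.Chars.find cs ['1', '1', '0'] ∧
    cs = cs.take (PySem.Chars.find cs ['1', '1', '0']).toNat ++ ['1', '1', '0'] ++
         cs.drop ((PySem.Chars.find cs ['1', '1', '0']).toNat + 3) := by
  have hocc : ['1', '1', '0'] <:+: cs := (PySem.Chars.find_ne_neg_one_iff cs _).mp h
  have hpos : 0 ≤ PySem.Chars.find cs ['1', '1', '0'] :=
    (PySem.Chars.find_nonneg_iff cs _).mpr hocc
  obtain ⟨hpre, -⟩ := PySem.Chars.find_spec hpos
  obtain ⟨rest, hrest⟩ := hpre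
  refine ⟨hpos, ?_⟩
  have hdrop3 : cs.drop ((PySem.Chars.find cs ['1', '1', '0']).toNat + 3) = rest := by
    have h2 := congrArg (List.drop 3) hrest
    simpa [List.drop_drop, Nat.add_comm] using h2.symm
  rw [List.append_assoc, hdrop3, hrest, List.take_append_drop]

theorem pvCut_len (cs : List Char) (h : ¬ PySem.Chars.find cs ['1', '1', '0'] = -1) :
    (PySem.List.slice cs none (some (PySem.Chars.find cs ['1', '1', '0'])) ++
     PySem.List.slice cs (some (PySem.Chars.find cs ['1', '1', '0'] + 3)) none).length < cs.length := by
  obtain ⟨hpos, hdec⟩ := pvCut cs h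
  rw [PySem.List.slice_to cs hpos, PySem.List.slice_from cs (by omega)]
  have h3 : (PySem.Chars.find cs ['1', '1', '0'] + 3).toNat
      = (PySem.Chars.find cs ['1', '1', '0']).toNat + 3 := by omega
  rw [h3]
  have hlen := congrArg List.length hdec
  simp only [List.length_append, List.length_cons, List.length_nil, List.length_take,
    List.length_drop] at hlen ⊢
  omega

-- B's loop: i = s.find("110"); while i != -1: s = s[:i] + s[i+3:]; cnt += 1; i = s.find("110")
-- (the index i is inlined rather than let-bound)
def pvBLoop (cs : List Char) (cnt : Int) : List Char × Int :=
  if h : PySem.Chars.find cs ['1', '1', '0'] = -1 then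
    (cs, cnt)
  else
    pvBLoop (PySem.List.slice cs none (some (PySem.Chars.find cs ['1', '1', '0'])) ++
             PySem.List.slice cs (some (PySem.Chars.find cs ['1', '1', '0'] + 3)) none) (cnt + 1)
termination_by cs.length
decreasing_by exact pvCut_len cs h

def find110s_alt (s : String) : String × Int :=
  let r := pvBLoop s.toList 0
  (String.ofList r.1, r.2)

-- ===== PRECONDITION & SPEC =====
def Spec_find110s (s : String) (out : String × Int) : Prop := out = find110s_alt s
instance (s : String) (out : String × Int) : Decidable (Spec_find110s s out) := by unfold Spec_find110s; infer_instance

-- ===== CLAIM (what is proved, stated in full; the proofs are below) =====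
def Claim_equal_find110s : Prop := ∀ (s : String), Dom_find110s s → Spec_find110s s (find110s s)

-- ===== LEMMAS AND PROOFS =====

-- reference machine for both proofs: a list stack kept in reversed order
def pvStepB (acc : List Char × Int) (ch : Char) : List Char × Int :=
  match ch :: acc.1 with
  | '0' :: '1' :: '1' :: rest => (rest, acc.2 + 1)
  | st => (st, acc.2)

-- invariant: the stack never contains "110" as an infix
def pvNoOcc (st : List Char) : Prop := ¬ (['1', '1', '0'] <:+: st)

theorem pvWhileA_stop (st : List Char) (cnt : Int)
    (h : ¬ (2 < st.length ∧ PySem.List.slice st (some (-3)) none = ['1', '1', '0'])) :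
    pvWhileA st cnt = (st, cnt) := by
  rw [pvWhileA]; simp [h]

theorem pvSuffix_of_cond (st : List Char)
    (h : 2 < st.length ∧ PySem.List.slice st (some (-3)) none = ['1', '1', '0']) :
    ['1', '1', '0'] <:+ st := by
  obtain ⟨hl, hs⟩ := h
  rw [PySem.List.slice_from_neg_ofNat st 3 (by omega)] at hs
  exact hs ▸ List.drop_suffix _ _

theorem pvCond_of_suffix (st : List Char) (h : ['1', '1', '0'] <:+ st) :
    2 < st.length ∧ PySem.List.slice st (some (-3)) none = ['1', '1', '0'] := by
  obtain ⟨pre, rfl⟩ := h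
  constructor
  · simp only [List.length_append, List.length_cons, List.length_nil]; omega
  · rw [PySem.List.slice_from_neg_ofNat _ 3 (by omega)]
    simp

theorem pvNoOcc_not_cond (st : List Char) (hno : pvNoOcc st) :
    ¬ (2 < st.length ∧ PySem.List.slice st (some (-3)) none = ['1', '1', '0']) := by
  intro h
  exact hno ((pvSuffix_of_cond st h).isInfix)

-- an infix of l ++ [c] is an infix of l or a suffix of l ++ [c]
theorem pvInfix_concat {α : Type} (p l : List α) (c : α) (h : p <:+: l ++ [c]) :
    p <:+: l ∨ p <:+ l ++ [c] := by
  obtain ⟨s, t, hst⟩ := h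
  rcases List.eq_nil_or_concat t with rfl | ⟨t', c', rfl⟩
  · right; exact ⟨s, by simpa using hst⟩
  · left
    refine ⟨s, t', ?_⟩
    have := congrArg List.dropLast hst
    simpa [← List.append_assoc, List.dropLast_concat] using this

-- one step: from a no-"110" stack, A's push-then-while equals the machine step,
-- and the invariant is preserved
theorem pvStep_eq (st : List Char) (cnt : Int) (ch : Char) (hno : pvNoOcc st) :
    (pvWhileA (st ++ [ch]) cnt = ((pvStepB (st.reverse, cnt) ch).1.reverse, (pvStepB (st.reverse, cnt) ch).2))
      ∧ pvNoOcc (pvStepB (st.reverse, cnt) ch).1.reverse := by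
  by_cases hsuf : ['1', '1', '0'] <:+ st ++ [ch]
  · -- the while fires exactly once
    obtain ⟨pre, hpre⟩ := hsuf
    have hch : ch = '0' := by
      have := congrArg (List.getLast? ) hpre
      exact (by simpa using this : '0' = ch).symm
    have hst : st = pre ++ ['1', '1'] := by
      have := congrArg List.dropLast hpre
      exact (by simpa [← List.append_assoc, List.dropLast_concat,
        show pre ++ ['1','1','0'] = (pre ++ ['1','1']) ++ ['0'] by simp] using this
          : pre ++ ['1', '1'] = st).symm
    subst hch
    have hnopre : pvNoOcc pre := by
      intro hin
      exact hno (hst ▸ hin.trans (List.prefix_append pre ['1', '1']).isInfix)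
    have hB : pvStepB (st.reverse, cnt) '0' = (pre.reverse, cnt + 1) := by
      simp [pvStepB, hst]
    rw [hB]
    have hA : pvWhileA (st ++ ['0']) cnt = (pre, cnt + 1) := by
      have hc := pvCond_of_suffix (st ++ ['0']) ⟨pre, hpre⟩
      rw [pvWhileA]; rw [dif_pos hc]
      have hslice : PySem.List.slice (st ++ ['0']) none (some (-3)) = pre := by
        rw [PySem.List.slice_to_neg_ofNat _ 3 (by omega), ← hpre]
        simp
      rw [hslice]
      exact pvWhileA_stop pre (cnt + 1) (pvNoOcc_not_cond pre hnopre)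
    exact ⟨by simp [hA], by simpa [pvNoOcc] using hnopre⟩
  · -- no match: while does not fire, the machine's pop branch does not fire
    have hcond := fun h => hsuf (pvSuffix_of_cond (st ++ [ch]) h)
    have hA := pvWhileA_stop (st ++ [ch]) cnt hcond
    have hB : pvStepB (st.reverse, cnt) ch = (ch :: st.reverse, cnt) := by
      unfold pvStepB
      split
      · next rest heq =>
        exfalso
        apply hsuf
        obtain ⟨rfl, hrev⟩ : ch = '0' ∧ st.reverse = '1' :: '1' :: rest := by
          injection heq with h1 h2
          exact ⟨h1, h2⟩
        have hst : st = rest.reverse ++ ['1', '1'] := by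
          have := congrArg List.reverse hrev
          simpa using this
        exact ⟨rest.reverse, by rw [hst]; simp⟩
      · rfl
    rw [hB, hA]
    refine ⟨by simp, ?_⟩
    simp only [List.reverse_cons, List.reverse_reverse]
    intro hin
    rcases pvInfix_concat _ _ _ hin with h | h
    · exact hno h
    · exact hsuf h

-- fold induction over the characters: A's fold equals the machine fold
theorem pvFold_eq (cs : List Char) (st : List Char) (cnt : Int) (hno : pvNoOcc st) :
    (cs.foldl (fun acc ch => pvWhileA (acc.1 ++ [ch]) acc.2) (st, cnt)) =
      (((cs.foldl pvStepB (st.reverse, cnt)).1.reverse, (cs.foldl pvStepB (st.reverse, cnt)).2)) := by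
  induction cs generalizing st cnt with
  | nil => simp
  | cons c cs ih =>
    obtain ⟨heq, hno'⟩ := pvStep_eq st cnt c hno
    simp only [List.foldl_cons, heq]
    have := ih _ (pvStepB (st.reverse, cnt) c).2 hno'
    simpa using this

-- the machine's count component only shifts with the initial count
theorem pvStepB_shift (st : List Char) (c : Int) (ch : Char) :
    pvStepB (st, c) ch = ((pvStepB (st, 0) ch).1, c + (pvStepB (st, 0) ch).2) := by
  unfold pvStepB
  split
  · next rest heq =>
    have heq' : ch :: st = '0' :: '1' :: '1' :: rest := heq
    rw [heq']; simp
  · simp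

theorem pvFoldB_shift (cs : List Char) (st : List Char) (c : Int) :
    cs.foldl pvStepB (st, c) =
      ((cs.foldl pvStepB (st, 0)).1, c + (cs.foldl pvStepB (st, 0)).2) := by
  induction cs generalizing st c with
  | nil => simp
  | cons ch cs ih =>
    simp only [List.foldl_cons]
    rw [pvStepB_shift st c ch, ih, ih (pvStepB (st, 0) ch).1 (pvStepB (st, 0) ch).2]
    simp [add_assoc]

-- pushing "110" through the machine removes it and bumps the count
theorem pvFoldB_skip (st : List Char) (c : Int) (v : List Char) :
    ('1' :: '1' :: '0' :: v).foldl pvStepB (st, c) = v.foldl pvStepB (st, c + 1) := by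
  have h1 : pvStepB (st, c) '1' = ('1' :: st, c) := by simp [pvStepB]
  have h2 : pvStepB ('1' :: st, c) '1' = ('1' :: '1' :: st, c) := by simp [pvStepB]
  have h3 : pvStepB ('1' :: '1' :: st, c) '0' = (st, c + 1) := by simp [pvStepB]
  simp only [List.foldl_cons, h1, h2, h3]

-- on a "110"-free list the machine just pushes everything
theorem pvFoldB_noOcc (cs : List Char) (st : List Char) (c : Int)
    (h : ¬ (['1', '1', '0'] <:+: st.reverse ++ cs)) :
    cs.foldl pvStepB (st, c) = ((st.reverse ++ cs).reverse, c) := by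
  induction cs generalizing st with
  | nil => simp
  | cons ch cs ih =>
    have hstep : pvStepB (st, c) ch = (ch :: st, c) := by
      unfold pvStepB
      split
      · next rest heq =>
        exfalso
        apply h
        have heq' : ch :: st = '0' :: '1' :: '1' :: rest := heq
        obtain ⟨rfl, hrev⟩ : ch = '0' ∧ st = '1' :: '1' :: rest := by
          injection heq' with h1 h2
          exact ⟨h1, h2⟩
        exact ⟨rest.reverse, cs, by rw [hrev]; simp⟩
      · rfl
    simp only [List.foldl_cons, hstep]
    have := ih (ch :: st) (by simpa using h)
    simpa using this

-- B's loop computes the machine's result (stack reversed, count added)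
theorem pvBLoop_eq (cs : List Char) (c : Int) :
    pvBLoop cs c = ((cs.foldl pvStepB ([], 0)).1.reverse, c + (cs.foldl pvStepB ([], 0)).2) := by
  induction cs, c using pvBLoop.induct with
  | case1 cs c h =>
    rw [pvBLoop, dif_pos h]
    have hno : ¬ (['1', '1', '0'] <:+: cs) := (PySem.Chars.find_eq_neg_one_iff cs _).mp h
    rw [pvFoldB_noOcc cs [] 0 (by simpa using hno)]
    simp
  | case2 cs c h ih =>
    rw [pvBLoop, dif_neg h, ih]
    obtain ⟨hpos, hdec⟩ := pvCut cs h
    rw [PySem.List.slice_to cs hpos, PySem.List.slice_from cs (by omega),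
      show (PySem.Chars.find cs ['1', '1', '0'] + 3).toNat
        = (PySem.Chars.find cs ['1', '1', '0']).toNat + 3 by omega] at ih ⊢
    set u := cs.take (PySem.Chars.find cs ['1', '1', '0']).toNat with hu
    set v := cs.drop ((PySem.Chars.find cs ['1', '1', '0']).toNat + 3) with hv
    have hF : cs.foldl pvStepB ([], 0) =
        (((u ++ v).foldl pvStepB ([], 0)).1, ((u ++ v).foldl pvStepB ([], 0)).2 + 1) := by
      conv_lhs => rw [hdec]
      rw [List.append_assoc]
      simp only [List.foldl_append]
      rcases hfu : u.foldl pvStepB (([] : List Char), (0 : Int)) with ⟨stu, cu⟩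
      have hskip : List.foldl pvStepB (stu, cu) ['1', '1', '0'] = (stu, cu + 1) := by
        simpa using pvFoldB_skip stu cu []
      rw [hskip, pvFoldB_shift v stu (cu + 1), pvFoldB_shift v stu cu]
      simp only [Prod.mk.injEq, true_and]
      ring
    rw [hF]
    simp only [Prod.mk.injEq, true_and]
    ring

-- ===== VERDICT (by name: the statement is the Claim_ definition above) =====
theorem find110s_spec : Claim_equal_find110s := by
  intro s _
  unfold Spec_find110s find110s find110s_alt
  have hA := pvFold_eq s.toList [] 0 (by intro h; simpa using h.length_le)
  simp only [List.reverse_nil] at hA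
  rw [hA, pvBLoop_eq]
  simp
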